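-- pv_equiv track=rewrite | github.com/univention/univention-corporate-server | management/univention-directory-manager-modules/modules/univention/admin/handlers/users/olduser.py | logonHoursMap
-- ===== SOURCE A (Python) =====
-- def logonHoursMap(logontimes):
-- 	"converts the bitfield 001110010110...100 to the respective string"
--
-- 	# convert list of bit numbers to bit-string
-- 	# bitstring = '0' * 168
--
-- 	if logontimes == '':
-- 		# if unsetting it, see Bug #33703
-- 		return None
--
-- 	bitstring = ''.join(map(lambda x: x in logontimes and '1' or '0', range(168)))
--
-- 	# for idx in logontimes:
-- 	# 	bitstring[ idx ] = '1'
--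
-- 	logontimes = bitstring
--
-- 	# the order of the bits of each byte has to be reversed. The reason for this is that
-- 	# consecutive bytes mean consecutive 8-hrs-intervals, but the leftmost bit stands for
-- 	# the last hour in that interval, the 2nd but leftmost bit for the second-but-last
-- 	# hour and so on. We want to hide this from anybody using this feature.
-- 	# See http://ma.ph-freiburg.de/tng/tng-technical/2003-04/msg00015.html for details.
--
-- 	newtimes = ""
-- 	for i in range(0, 21):
-- 		bitlist = list(logontimes[(i * 8):(i * 8) + 8])
-- 		bitlist.reverse()
-- 		newtimes += "".join(bitlist)
-- 	logontimes = newtimes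
--
-- 	# create a hexnumber from each 8-bit-segment
-- 	ret = ""
-- 	for i in range(0, 21):
-- 		val = 0
-- 		exp = 7
-- 		for j in range((i * 8), (i * 8) + 8):
-- 			if not (logontimes[j] == "0"):
-- 				val += 2**exp
-- 			exp -= 1
-- 		# we now have: 0<=val<=255
-- 		hx = hex(val)[2:4]
-- 		if len(hx) == 1:
-- 			hx = "0" + hx
-- 		ret += hx
--
-- 	return ret
-- ===== SOURCE B (Python) =====
-- def logonHoursMap(logontimes):
--     "converts the bitfield 001110010110...100 to the respective string"
--     if logontimes == '':
--         # if unsetting it, see Bug #33703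
--         return None
--     hours = set(logontimes)
--     # per-byte reversal cancels the descending exponents: bit idx has weight 2**(idx % 8)
--     return ''.join('%02x' % sum(1 << k for k in range(8) if i * 8 + k in hours)
--                    for i in range(21))
-- ===== Notes on version B (the rewrite author's own statement) =====
-- stated objective: simpler
-- what changed: A builds a 168-character '0'/'1' string, reverses each of its 21 8-character chunks in a second pass, then re-scans each chunk accumulating 2**exp with a descending exponent and slices hex(); B exploits that the per-byte reversal cancels the descending exponents, so it computes each of the 21 bytes directly as sum(1 << k for k in range(8) if i*8+k in set(logontimes)) and formats it with '%02x'.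
import Mathlib
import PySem

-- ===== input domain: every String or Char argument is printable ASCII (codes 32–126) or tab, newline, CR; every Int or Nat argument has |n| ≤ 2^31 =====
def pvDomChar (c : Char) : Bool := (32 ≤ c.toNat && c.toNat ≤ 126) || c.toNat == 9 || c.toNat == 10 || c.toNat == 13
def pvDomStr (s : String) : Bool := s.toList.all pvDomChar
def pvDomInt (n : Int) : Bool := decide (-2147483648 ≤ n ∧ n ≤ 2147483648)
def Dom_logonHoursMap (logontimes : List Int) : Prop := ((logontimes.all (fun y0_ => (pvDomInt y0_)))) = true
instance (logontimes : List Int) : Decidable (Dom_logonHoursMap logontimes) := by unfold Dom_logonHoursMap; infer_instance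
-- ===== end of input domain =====

-- B replaces A's three passes (168-char bitstring, per-byte reversal, descending-exponent
-- accumulation with hex() slicing) by one direct per-byte sum of weights 2^(idx%8); objective: simpler.

-- ===== PORT A =====
-- shared hex-digit helpers (port of Python's hex digits, lowercase; fuel only makes the recursion structural)
def hexDigitChar (n : Nat) : Char := if n < 10 then Char.ofNat (48 + n) else Char.ofNat (87 + n)
def hexCharsAux : Nat → Nat → List Char
  | 0, n => [hexDigitChar n]
  | fuel+1, n => if n < 16 then [hexDigitChar n] else hexCharsAux fuel (n / 16) ++ [hexDigitChar (n % 16)]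
-- hex(n) for n ≥ 0, without the '0x' prefix (exact: fuel n suffices since n/16 strictly decreases)
def hexChars (n : Nat) : List Char := hexCharsAux n n

-- 'x in logontimes and '1' or '0''
def pvBit (xs : List Int) (x : Int) : Char := if xs.contains x then '1' else '0'
-- bitstring = ''.join(map(..., range(168)))
def pvBitstring (xs : List Int) : List Char := (PySem.List.pyRange 0 168 1).map (pvBit xs)
-- one iteration of the reversal loop: list(logontimes[i*8:i*8+8]) reversed
def pvChunk (xs : List Int) (i : Int) : List Char :=
  (PySem.List.slice (pvBitstring xs) (some (i*8)) (some (i*8+8))).reverse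
-- newtimes after the 'for i in range(0, 21)' reversal loop
def pvNewtimes (xs : List Int) : List Char :=
  (PySem.List.pyRange 0 21 1).foldl (fun acc i => acc ++ pvChunk xs i) []
-- one iteration of the hex loop: val/exp accumulation over range(i*8, i*8+8), then hex(val)[2:4] and padding
def pvByteHex (xs : List Int) (i : Int) : List Char :=
  let v := ((PySem.List.pyRange (i*8) (i*8+8) 1).foldl
      (fun (p : Nat × Int) j =>
        (if ¬ (PySem.List.pyGetD (pvNewtimes xs) j ' ' = '0') then p.1 + 2 ^ p.2.toNat else p.1,
         p.2 - 1)) (0, 7)).1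
  let hx := PySem.List.slice ('0' :: 'x' :: hexChars v) (some 2) (some 4)
  if hx.length = 1 then '0' :: hx else hx

def logonHoursMap (logontimes : List Int) : Option String :=
  -- 'if logontimes == ""' is False for every list argument, so that branch is unreachable here
  some (String.ofList
    ((PySem.List.pyRange 0 21 1).foldl (fun acc i => acc ++ pvByteHex logontimes i) []))

-- ===== PORT B =====
-- '%02x' % n for n ≥ 0 (exact for n < 256: pads a single hex digit with one '0')
def fmt02x (n : Nat) : List Char :=
  let ds := hexChars n
  if ds.length < 2 then '0' :: ds else ds
-- sum(1 << k for k in range(8) if i * 8 + k in hours)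
def pvByte (hours : PySem.Set Int) (i : Int) : Int :=
  (((PySem.List.pyRange 0 8 1).filter (fun k => hours.contains (i*8+k))).map
      (fun k => (1:Int) <<< k.toNat)).sum

def logonHoursMap_alt (logontimes : List Int) : Option String :=
  -- 'if logontimes == ""' is False for every list argument, so that branch is unreachable here
  let hours : PySem.Set Int := PySem.Set.ofList logontimes
  some (String.ofList
    ((PySem.List.pyRange 0 21 1).flatMap (fun i => fmt02x (pvByte hours i).toNat)))

-- ===== PRECONDITION & SPEC =====
def Spec_logonHoursMap (logontimes : List Int) (out : Option String) : Prop := out = logonHoursMap_alt logontimes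
instance (logontimes : List Int) (out : Option String) : Decidable (Spec_logonHoursMap logontimes out) := by unfold Spec_logonHoursMap; infer_instance

-- ===== CLAIM (what is proved, stated in full; the proofs are below) =====
def Claim_equal_logonHoursMap : Prop := ∀ (logontimes : List Int), Dom_logonHoursMap logontimes → Spec_logonHoursMap logontimes (logonHoursMap logontimes)

-- ===== LEMMAS AND PROOFS =====

lemma range8 (a : Int) : PySem.List.pyRange a (a+8) 1 = [a,a+1,a+2,a+3,a+4,a+5,a+6,a+7] := by
  rw [PySem.List.pyRange_one, show a + 8 - a = 8 by ring, show Int.toNat 8 = 8 from rfl]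
  simp [List.range_succ]

lemma set_contains (xs : List Int) (y : Int) :
    PySem.Set.contains (PySem.Set.ofList xs) y = xs.contains y := by
  simp [PySem.Set.contains]

lemma pvBit_ne (xs : List Int) (x : Int) : (¬ (pvBit xs x = '0')) ↔ xs.contains x = true := by
  unfold pvBit; cases h : xs.contains x <;> simp

lemma chunk_eq (xs : List Int) {i : Int} (h0 : 0 ≤ i) (h21 : i < 21) :
    pvChunk xs i = [pvBit xs (i*8+7), pvBit xs (i*8+6), pvBit xs (i*8+5), pvBit xs (i*8+4),
                    pvBit xs (i*8+3), pvBit xs (i*8+2), pvBit xs (i*8+1), pvBit xs (i*8)] := by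
  unfold pvChunk pvBitstring
  rw [PySem.List.slice_toNat _ (by omega) (by omega)]
  rw [PySem.List.pyRange_one_append 0 (i*8) 168 (by omega) (by omega)]
  rw [PySem.List.pyRange_one_append (i*8) (i*8+8) 168 (by omega) (by omega)]
  rw [List.map_append, List.map_append]
  rw [List.drop_left' (by simp [PySem.List.length_pyRange_one])]
  rw [show (i*8+8).toNat - (i*8).toNat = 8 by omega]
  rw [List.take_left' (by simp [PySem.List.length_pyRange_one])]
  rw [range8 (i*8)]
  simp

lemma chunk_len (xs : List Int) {i : Int} (h0 : 0 ≤ i) (h21 : i < 21) :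
    (pvChunk xs i).length = 8 := by rw [chunk_eq xs h0 h21]; rfl

lemma newtimes_getD (xs : List Int) {i : Int} (h0 : 0 ≤ i) (h21 : i < 21)
    (m : Nat) (hm : m < 8) :
    PySem.List.pyGetD (pvNewtimes xs) (i*8 + (m:Int)) ' ' = pvBit xs (i*8 + (7 - (m:Int))) := by
  unfold pvNewtimes
  rw [PySem.List.foldl_append_eq_flatMap, List.nil_append]
  rw [PySem.List.pyRange_one_append 0 i 21 h0 (by omega), List.flatMap_append]
  rw [PySem.List.pyRange_one_cons h21, List.flatMap_cons]
  have hP : ((PySem.List.pyRange 0 i 1).flatMap (pvChunk xs)).length = 8 * i.toNat := by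
    rw [List.length_flatMap]
    rw [List.map_congr_left (g := fun _ => 8) (by
      intro j hj
      rw [PySem.List.mem_pyRange_one] at hj
      exact chunk_len xs hj.1 (by omega))]
    simp [PySem.List.length_pyRange_one, Nat.mul_comm]
  rw [show (i*8 + (m:Int)) = ((8 * i.toNat + m : Nat) : Int) by push_cast [Int.toNat_of_nonneg h0]; ring]
  rw [PySem.List.pyGetD_natCast]
  rw [List.getD_append_right _ _ _ _ (by omega)]
  rw [hP, show 8 * i.toNat + m - (8 * i.toNat) = m by omega]
  rw [List.getD_append _ _ _ m (by rw [chunk_len xs h0 h21]; omega)]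
  rw [chunk_eq xs h0 h21]
  interval_cases m <;> norm_num

lemma byte_eq (xs : List Int) {i : Int} (h0 : 0 ≤ i) (h21 : i < 21) :
    pvByteHex xs i = fmt02x (pvByte (PySem.Set.ofList xs) i).toNat := by
  have e0 := newtimes_getD xs h0 h21 0 (by omega)
  have e1 := newtimes_getD xs h0 h21 1 (by omega)
  have e2 := newtimes_getD xs h0 h21 2 (by omega)
  have e3 := newtimes_getD xs h0 h21 3 (by omega)
  have e4 := newtimes_getD xs h0 h21 4 (by omega)
  have e5 := newtimes_getD xs h0 h21 5 (by omega)
  have e6 := newtimes_getD xs h0 h21 6 (by omega)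
  have e7 := newtimes_getD xs h0 h21 7 (by omega)
  norm_num at e0 e1 e2 e3 e4 e5 e6 e7
  unfold pvByteHex pvByte
  rw [range8 (i*8)]
  rw [show PySem.List.pyRange 0 8 1 = [0,1,2,3,4,5,6,7] from rfl]
  simp only [List.foldl, List.filter, List.sum, set_contains]
  rw [e0, e1, e2, e3, e4, e5, e6, e7]
  simp only [pvBit_ne]
  norm_num
  simp only [← Bool.cond_decide]
  generalize decide (i*8 ∈ xs) = b0
  generalize decide (i*8+1 ∈ xs) = b1
  generalize decide (i*8+2 ∈ xs) = b2
  generalize decide (i*8+3 ∈ xs) = b3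
  generalize decide (i*8+4 ∈ xs) = b4
  generalize decide (i*8+5 ∈ xs) = b5
  generalize decide (i*8+6 ∈ xs) = b6
  generalize decide (i*8+7 ∈ xs) = b7
  revert b0 b1 b2 b3 b4 b5 b6 b7
  clear e0 e1 e2 e3 e4 e5 e6 e7 h0 h21
  decide

-- ===== VERDICT (by name: the statement is the Claim_ definition above) =====
theorem logonHoursMap_spec : Claim_equal_logonHoursMap := by
  intro xs _
  unfold Spec_logonHoursMap
  simp only [logonHoursMap, logonHoursMap_alt]
  rw [PySem.List.foldl_append_eq_flatMap, List.nil_append]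
  exact congrArg (some ∘ String.ofList) (List.flatMap_congr (fun i hi => by
    rw [PySem.List.mem_pyRange_one] at hi
    exact byte_eq xs hi.1 hi.2))
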